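-- pv_equiv track=rewrite | github.com/privacy97/Programmers | 프로그래머스/lv0/120869. 외계어 사전/외계어 사전.py | solution
-- ===== SOURCE A (Python) =====
-- def solution(spell, dic):
--     answer = 2
--     for i in dic:
--         count = 0
--         for j in spell:
--             if j in list(i):
--                 count += 1
--             i = i.replace(j, '', 1)
--         if i == '' and count == len(spell):
--             answer = 1
--             break
--     return answer
-- ===== SOURCE B (Python) =====
-- def solution(spell, dic):
--     target = sorted(spell)
--     return 1 if any(sorted(word) == target for word in dic) else 2
-- ===== Notes on version B (the rewrite author's own statement) =====
-- stated objective: simpler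
-- what changed: Replaced the nested per-character membership/replace/count loop (each step rescans and rebuilds the word) with a one-line anagram test: sort each word and the spell once and compare (sorted(word) == sorted(spell)).
import Mathlib
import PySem

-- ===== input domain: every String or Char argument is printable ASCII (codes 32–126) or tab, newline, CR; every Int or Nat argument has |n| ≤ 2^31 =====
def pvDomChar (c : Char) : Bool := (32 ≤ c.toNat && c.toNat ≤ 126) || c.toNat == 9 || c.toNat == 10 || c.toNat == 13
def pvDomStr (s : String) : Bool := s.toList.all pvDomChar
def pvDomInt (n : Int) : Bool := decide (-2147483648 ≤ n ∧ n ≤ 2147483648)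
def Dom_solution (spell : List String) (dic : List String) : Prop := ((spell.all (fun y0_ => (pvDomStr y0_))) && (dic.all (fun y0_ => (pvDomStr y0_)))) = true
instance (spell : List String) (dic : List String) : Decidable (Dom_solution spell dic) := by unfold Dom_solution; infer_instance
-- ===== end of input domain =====

-- B replaces A's nested membership/replace/count loop by the plain anagram test
-- sorted(word) == sorted(spell) (objective: simpler).

-- ===== PORT A =====
-- i.replace(j, '', 1): remove the first occurrence of the substring j (hand port, exact:
-- with j = '' Python's replace('', '', 1) leaves the string unchanged, as does the
-- [].isPrefixOf/drop 0 branch here).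
def pvRemoveFirst : List Char → List Char → List Char
  | [], _ => []
  | c :: rest, old =>
    if old.isPrefixOf (c :: rest) then (c :: rest).drop old.length
    else c :: pvRemoveFirst rest old

-- one iteration of A's inner 'for j in spell' loop; state = (current i, count).
-- 'j in list(i)': membership of the string j among i's characters as 1-char strings.
def pvStepA (st : List Char × Nat) (j : String) : List Char × Nat :=
  (pvRemoveFirst st.1 j.toList,
   if j ∈ st.1.map (fun c => String.ofList [c]) then st.2 + 1 else st.2)

-- A's outer 'for i in dic' loop with the break
def pvGoA (spell : List String) : List String → Int
  | [] => 2
  | i :: rest =>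
    let r := spell.foldl pvStepA (i.toList, 0)
    if r.1 = [] ∧ r.2 = spell.length then 1 else pvGoA spell rest

def solution (spell : List String) (dic : List String) : Int := pvGoA spell dic

-- ===== PORT B =====
def solution_alt (spell : List String) (dic : List String) : Int :=
  let target := PySem.List.sorted spell (fun x => x) false
  if dic.any (fun word =>
      PySem.List.sorted (word.toList.map (fun c => String.ofList [c])) (fun x => x) false == target)
  then 1 else 2

-- ===== PRECONDITION & SPEC =====
def Spec_solution (spell : List String) (dic : List String) (out : Int) : Prop := out = solution_alt spell dic
instance (spell : List String) (dic : List String) (out : Int) : Decidable (Spec_solution spell dic out) := by unfold Spec_solution; infer_instance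

-- ===== CLAIM (what is proved, stated in full; the proofs are below) =====
def Claim_equal_solution : Prop := ∀ (spell : List String) (dic : List String), Dom_solution spell dic → Spec_solution spell dic (solution spell dic)

-- ===== LEMMAS AND PROOFS =====

theorem pvSingleton_injective : Function.Injective (fun c : Char => String.ofList [c]) := by
  intro a b h
  have := congrArg String.toList h
  simpa using this

-- removing the first occurrence of a single character is List.erase
theorem pvRemoveFirst_single (s : List Char) (ch : Char) :
    pvRemoveFirst s [ch] = s.erase ch := by
  induction s with
  | nil => rfl
  | cons c rest ih =>
    simp only [pvRemoveFirst, List.erase_cons]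
    by_cases h : ch = c
    · subst h; simp [List.isPrefixOf]
    · have hb : (c == ch) = false := by simp [Ne.symm h]
      have hp : [ch].isPrefixOf (c :: rest) = false := by
        simp [List.isPrefixOf, h]
      simp [hp, hb, ih]

-- the count component grows by at most one per iteration
theorem pvCount_le (l : List String) (s : List Char) (c : Nat) :
    (l.foldl pvStepA (s, c)).2 ≤ c + l.length := by
  induction l generalizing s c with
  | nil => simp
  | cons j js ih =>
    simp only [List.foldl_cons, pvStepA, List.length_cons]
    split
    · exact le_trans (ih _ _) (by omega)
    · exact le_trans (ih _ _) (by omega)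

-- characterisation of A's inner loop: it ends with i = '' and count = len(spell)
-- exactly when spell is the list of i's characters, as 1-char strings, in some order
theorem pvInner_char (spell : List String) (s : List Char) (c : Nat) :
    spell.foldl pvStepA (s, c) = ([], c + spell.length) ↔
      (s.map (fun ch => String.ofList [ch])).Perm spell := by
  induction spell generalizing s c with
  | nil =>
    constructor
    · intro h
      have hs : s = [] := congrArg Prod.fst h
      simp [hs]
    · intro h
      have hs : s.map (fun ch => String.ofList [ch]) = [] := h.eq_nil
      have : s = [] := by simpa using hs
      simp [this]
  | cons j js ih =>
    by_cases hmem : j ∈ s.map (fun ch => String.ofList [ch])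
    · -- j is one of i's characters: the step removes it and counts it
      obtain ⟨ch, hch, hj⟩ := List.mem_map.mp hmem
      have hstep : pvStepA (s, c) j = (s.erase ch, c + 1) := by
        have htl : j.toList = [ch] := by rw [← hj]; simp
        simp only [pvStepA]
        rw [if_pos hmem, htl, pvRemoveFirst_single]
      rw [List.foldl_cons, hstep]
      have harr : c + (j :: js).length = (c + 1) + js.length := by simp; omega
      rw [harr, ih]
      have hmap : (s.erase ch).map (fun ch => String.ofList [ch]) =
          (s.map (fun ch => String.ofList [ch])).erase j := by
        rw [← hj]; exact List.map_erase pvSingleton_injective s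
      constructor
      · intro h
        have : (j :: js).Perm (s.map fun ch => String.ofList [ch]) := by
          rw [List.cons_perm_iff_perm_erase]
          exact ⟨hmem, (hmap ▸ h).symm⟩
        exact this.symm
      · intro h
        rw [hmap]
        have := (List.cons_perm_iff_perm_erase.mp h.symm).2
        exact this.symm
    · -- j is not a character of i: neither side can hold
      constructor
      · intro h
        exfalso
        have hstep : (pvStepA (s, c) j).2 = c := by
          simp only [pvStepA]
          rw [if_neg hmem]
        have hle : ((j :: js).foldl pvStepA (s, c)).2 ≤ c + js.length := by
          rw [List.foldl_cons]
          calc (js.foldl pvStepA (pvStepA (s, c) j)).2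
              ≤ (pvStepA (s, c) j).2 + js.length := pvCount_le js _ _
            _ = c + js.length := by rw [hstep]
        rw [h] at hle
        simp at hle
      · intro h
        exfalso
        exact hmem (h.mem_iff.mpr (List.mem_cons_self))

-- per-word agreement of the two tests
theorem pvWord_iff (spell : List String) (w : String) :
    ((spell.foldl pvStepA (w.toList, 0)).1 = [] ∧
       (spell.foldl pvStepA (w.toList, 0)).2 = spell.length) ↔
      (PySem.List.sorted (w.toList.map (fun c => String.ofList [c])) (fun x => x) false ==
        PySem.List.sorted spell (fun x => x) false) = true := by
  rw [beq_iff_eq, PySem.List.sorted_id_eq_sorted_id_iff_perm,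
      ← pvInner_char spell w.toList 0]
  constructor
  · intro ⟨h1, h2⟩
    have : spell.foldl pvStepA (w.toList, 0) =
        ((spell.foldl pvStepA (w.toList, 0)).1, (spell.foldl pvStepA (w.toList, 0)).2) := rfl
    rw [this, h1, h2]; simp
  · intro h
    constructor
    · exact congrArg Prod.fst h
    · have := congrArg Prod.snd h; simpa using this

theorem pvGo_eq (spell : List String) (dic : List String) :
    pvGoA spell dic = solution_alt spell dic := by
  induction dic with
  | nil => simp [pvGoA, solution_alt]
  | cons w rest ih =>
    simp only [pvGoA, solution_alt, List.any_cons]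
    by_cases h : (spell.foldl pvStepA (w.toList, 0)).1 = [] ∧
        (spell.foldl pvStepA (w.toList, 0)).2 = spell.length
    · have hb := (pvWord_iff spell w).mp h
      simp [h, hb]
    · have hb : (PySem.List.sorted (w.toList.map (fun c => String.ofList [c])) (fun x => x) false ==
          PySem.List.sorted spell (fun x => x) false) = false := by
        rw [Bool.eq_false_iff]
        intro hc
        exact h ((pvWord_iff spell w).mpr hc)
      simp only [hb, Bool.false_or, if_neg h]
      simpa [solution_alt] using ih

-- ===== VERDICT (by name: the statement is the Claim_ definition above) =====
theorem solution_spec : Claim_equal_solution := by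
  intro spell dic _
  unfold Spec_solution solution
  exact pvGo_eq spell dic
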